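-- pv_equiv track=rewrite | github.com/irinaexzellent/algorithms_part3 | P. partial_sorting/partial_sorting.py | find_count_segments
-- ===== SOURCE A (Python) =====
-- def find_count_segments(array):
--     count = 1
--     current_index = 0
--     current_block_max = 0
--     while current_index != len(array)-1:
--         current_min = array[current_index+1]
--         for j in range(current_index+1, len(array)):
--             if array[j] < current_min:
--                 current_min = array[j]
--         if current_block_max > 0:
--             if current_block_max < current_min:
--                 count += 1
--         elif array[current_index] < current_min:
--             count += 1
--         current_index += 1
--         if array[current_index] > current_block_max:
--             current_block_max = array[current_index]
--     return count
-- ===== SOURCE B (Python) =====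
-- def find_count_segments(array):
--     # O(n): precompute suffix minima once, then a single forward pass
--     # keeping the same block-max state as the original.
--     n = len(array)
--     suf = [0] * n
--     m = array[-1]
--     for i in range(n - 1, -1, -1):
--         if array[i] < m:
--             m = array[i]
--         suf[i] = m
--     count = 1
--     block_max = 0
--     for i in range(n - 1):
--         cm = suf[i + 1]
--         if block_max > 0:
--             if block_max < cm:
--                 count += 1
--         elif array[i] < cm:
--             count += 1
--         if array[i + 1] > block_max:
--             block_max = array[i + 1]
--     return count
-- ===== Notes on version B (the rewrite author's own statement) =====
-- stated objective: faster
-- what changed: Replaced the O(n^2) rescan of the suffix minimum inside the while-loop by a precomputed suffix-minima array and a single forward pass over index pairs, keeping the same count/block-max state.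
import Mathlib
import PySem

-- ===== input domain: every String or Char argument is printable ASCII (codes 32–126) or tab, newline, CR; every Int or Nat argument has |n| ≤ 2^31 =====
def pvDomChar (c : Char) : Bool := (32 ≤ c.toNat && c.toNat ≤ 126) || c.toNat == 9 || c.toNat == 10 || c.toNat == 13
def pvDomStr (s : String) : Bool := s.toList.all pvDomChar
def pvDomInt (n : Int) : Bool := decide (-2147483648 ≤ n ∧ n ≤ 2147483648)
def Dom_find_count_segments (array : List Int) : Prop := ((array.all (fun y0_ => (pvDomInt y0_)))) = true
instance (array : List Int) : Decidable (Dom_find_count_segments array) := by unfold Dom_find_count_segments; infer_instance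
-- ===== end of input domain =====

-- B replaces A's O(n^2) inner rescan of the suffix minimum by a precomputed
-- suffix-minima list and one forward pass over the same count/block-max state.

-- ===== PORT A =====
-- while-loop of A as fuelled recursion (fuel = array.length suffices: the loop
-- runs len-1 times; the fuel guard only makes the recursion total).
def fcsLoopA (array : List Int) (fuel : Nat) (count : Int) (current_index : Nat)
    (current_block_max : Int) : Int :=
  match fuel with
  | 0 => count
  | fuel + 1 =>
    if current_index = array.length - 1 then count
    else
      -- inner for j in range(current_index+1, len(array)): running minimum
      let current_min :=
        (List.range' (current_index + 1) (array.length - (current_index + 1))).foldl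
          (fun m j => if array.getD j 0 < m then array.getD j 0 else m)
          (array.getD (current_index + 1) 0)
      let count :=
        if current_block_max > 0 then
          if current_block_max < current_min then count + 1 else count
        else if array.getD current_index 0 < current_min then count + 1 else count
      let ci := current_index + 1
      let cbm :=
        if array.getD ci 0 > current_block_max then array.getD ci 0 else current_block_max
      fcsLoopA array fuel count ci cbm

def find_count_segments (array : List Int) : Int :=
  fcsLoopA array array.length 1 0 0

-- ===== PORT B =====
-- backward loop of Source B (suf[i] = running min of array[i:]) as structural recursion
def fcsSuffix (array : List Int) : List Int :=
  match array with
  | [] => []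
  | x :: xs =>
    match fcsSuffix xs with
    | [] => [x]
    | m :: rest => (if x < m then x else m) :: m :: rest

-- forward loop of Source B over (array[i], suf[i+1], array[i+1])
def fcsForward : List Int → List Int → Int → Int → Int
  | a :: b :: rest, _ :: cm :: srest, count, block_max =>
      let count :=
        if block_max > 0 then
          if block_max < cm then count + 1 else count
        else if a < cm then count + 1 else count
      let block_max := if b > block_max then b else block_max
      fcsForward (b :: rest) (cm :: srest) count block_max
  | _, _, count, _ => count

def find_count_segments_alt (array : List Int) : Int :=
  fcsForward array (fcsSuffix array) 1 0

-- ===== PRECONDITION & SPEC =====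
-- Pre_ excludes only the empty list, on which Python A raises IndexError.
def Pre_find_count_segments (array : List Int) : Prop := array ≠ []
instance (array : List Int) : Decidable (Pre_find_count_segments array) := by
  unfold Pre_find_count_segments; infer_instance
def pvWitness_find_count_segments : List Int := [3, 1, 2, 4]

def Spec_find_count_segments (array : List Int) (out : Int) : Prop :=
  out = find_count_segments_alt array
instance (array : List Int) (out : Int) : Decidable (Spec_find_count_segments array out) := by
  unfold Spec_find_count_segments; infer_instance

-- ===== CLAIM (what is proved, stated in full; the proofs are below) =====
def Claim_equal_find_count_segments : Prop :=
  ∀ (array : List Int), Dom_find_count_segments array → Pre_find_count_segments array →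
    Spec_find_count_segments array (find_count_segments array)

-- ===== LEMMAS AND PROOFS =====

theorem fcsSuffix_ne_nil (a : Int) (l : List Int) : fcsSuffix (a :: l) ≠ [] := by
  have hstep : fcsSuffix (a :: l)
      = (match fcsSuffix l with
         | [] => [a]
         | m :: rest => (if a < m then a else m) :: m :: rest) := rfl
  rw [hstep]
  cases fcsSuffix l <;> simp

theorem fcsSuffix_cons (a : Int) (l : List Int) (hl : l ≠ []) :
    fcsSuffix (a :: l) =
      (if a < (fcsSuffix l).headD 0 then a else (fcsSuffix l).headD 0) :: fcsSuffix l := by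
  cases l with
  | nil => exact absurd rfl hl
  | cons b t =>
    have hstep : fcsSuffix (a :: b :: t)
        = (match fcsSuffix (b :: t) with
           | [] => [a]
           | m :: rest => (if a < m then a else m) :: m :: rest) := rfl
    cases h : fcsSuffix (b :: t) with
    | nil => exact absurd h (fcsSuffix_ne_nil b t)
    | cons m rest => rw [hstep, h]; simp

theorem foldl_min_comm (l : List Int) (a b : Int) :
    l.foldl min (min a b) = min a (l.foldl min b) := by
  induction l generalizing b with
  | nil => simp
  | cons c t ih =>
    simp only [List.foldl_cons]
    rw [min_assoc, ih]

-- head of fcsSuffix is the fold-minimum of the list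
theorem fcsSuffix_head (a : Int) (l : List Int) :
    (fcsSuffix (a :: l)).headD 0 = l.foldl min a := by
  induction l generalizing a with
  | nil => simp [fcsSuffix]
  | cons b t ih =>
    rw [fcsSuffix_cons a (b :: t) (by simp), List.headD_cons, ih b, List.foldl_cons,
        foldl_min_comm]
    simp only [min_def]
    split <;> split <;> omega

-- the indices range' s (len - s) map through getD to drop s
theorem map_getD_range' (l : List Int) (s : Nat) (hs : s ≤ l.length) :
    (List.range' s (l.length - s)).map (fun j => l.getD j 0) = l.drop s := by
  have h : ∀ n s, s + n = l.length →
      (List.range' s n).map (fun j => l.getD j 0) = l.drop s := by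
    intro n
    induction n with
    | zero =>
      intro s h
      simp [List.drop_of_length_le (show l.length ≤ s by omega)]
    | succ k ih =>
      intro s h
      have hslt : s < l.length := by omega
      rw [List.range'_succ, List.map_cons, ih (s+1) (by omega),
          List.drop_eq_getElem_cons hslt]
      simp [List.getD_eq_getElem?_getD, List.getElem?_eq_getElem hslt]
  exact h (l.length - s) s (by omega)

-- A's inner loop computes the fold-min over the dropped suffix
theorem inner_min_eq (l : List Int) (i : Nat) (hi : i + 1 < l.length) :
    (List.range' (i + 1) (l.length - (i + 1))).foldl
        (fun m j => if l.getD j 0 < m then l.getD j 0 else m)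
        (l.getD (i + 1) 0)
      = (fcsSuffix (l.drop (i + 1))).headD 0 := by
  have hmap := map_getD_range' l (i + 1) (by omega)
  have hdrop : l.drop (i + 1) = l[i+1] :: l.drop (i + 2) :=
    List.drop_eq_getElem_cons hi
  have hfold :
      (List.range' (i + 1) (l.length - (i + 1))).foldl
        (fun m j => if l.getD j 0 < m then l.getD j 0 else m)
        (l.getD (i + 1) 0)
      = (l.drop (i + 1)).foldl (fun m x => if x < m then x else m) (l.getD (i + 1) 0) := by
    rw [← hmap, List.foldl_map]
  have hget : l.getD (i + 1) 0 = l[i+1] := by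
    simp [List.getD_eq_getElem?_getD, List.getElem?_eq_getElem hi]
  rw [hfold, hdrop, hget, fcsSuffix_head]
  simp only [List.foldl_cons]
  rw [show (if (l[i+1] : Int) < l[i+1] then l[i+1] else l[i+1]) = l[i+1] by simp]
  have hifmin : ∀ (t : List Int) (a : Int),
      t.foldl (fun m x => if x < m then x else m) a = t.foldl min a := by
    intro t
    induction t with
    | nil => intro a; rfl
    | cons x xs ihx =>
      intro a
      simp only [List.foldl_cons, ihx]
      congr 1
      simp only [min_def]
      split <;> split <;> omega
  rw [hifmin]

-- main invariant: A's loop from index i equals B's forward pass on the suffix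
theorem loop_eq (l : List Int) (fuel i : Nat) (count bm : Int)
    (hi : i < l.length) (hf : l.length - i ≤ fuel) :
    fcsLoopA l fuel count i bm
      = fcsForward (l.drop i) (fcsSuffix (l.drop i)) count bm := by
  induction fuel generalizing i count bm with
  | zero => omega
  | succ k ih =>
    by_cases hlast : i = l.length - 1
    · have hdrop : l.drop i = [l[i]] := by
        rw [List.drop_eq_getElem_cons hi]
        rw [List.drop_of_length_le (show l.length ≤ i + 1 by omega)]
      rw [hdrop]
      simp [fcsLoopA, hlast, fcsForward]
    · have hi1 : i + 1 < l.length := by omega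
      have hd1 : l.drop i = l[i] :: l.drop (i + 1) := List.drop_eq_getElem_cons hi
      have hd2 : l.drop (i + 1) = l[i+1] :: l.drop (i + 2) := List.drop_eq_getElem_cons hi1
      have hgetd : l.getD i 0 = l[i] := by
        simp [List.getD_eq_getElem?_getD, List.getElem?_eq_getElem hi]
      have hgetd1 : l.getD (i + 1) 0 = l[i+1] := by
        simp [List.getD_eq_getElem?_getD, List.getElem?_eq_getElem hi1]
      have hA : fcsLoopA l (k+1) count i bm
          = fcsLoopA l k
              (if bm > 0 then
                 if bm < (fcsSuffix (l.drop (i+1))).headD 0 then count + 1 else count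
               else if l[i] < (fcsSuffix (l.drop (i+1))).headD 0 then count + 1 else count)
              (i + 1)
              (if l[i+1] > bm then l[i+1] else bm) := by
        simp only [fcsLoopA, hlast, if_false]
        rw [inner_min_eq l i hi1, hgetd, hgetd1]
      obtain ⟨m, rest, hsuf⟩ : ∃ m rest, fcsSuffix (l.drop (i+1)) = m :: rest := by
        cases h : fcsSuffix (l.drop (i+1)) with
        | nil => rw [hd2] at h; exact absurd h (fcsSuffix_ne_nil _ _)
        | cons a b => exact ⟨a, b, rfl⟩
      have hlne : l.drop (i+1) ≠ [] := by
        apply List.ne_nil_of_length_pos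
        rw [List.length_drop]
        omega
      have hsufcons : fcsSuffix (l.drop i)
          = (if l[i] < m then l[i] else m) :: m :: rest := by
        rw [hd1, fcsSuffix_cons l[i] _ hlne, hsuf]
        simp
      have hhead : (fcsSuffix (l.drop (i+1))).headD 0 = m := by rw [hsuf]; rfl
      have hforward : fcsForward (l.drop i) (fcsSuffix (l.drop i)) count bm
          = fcsForward (l.drop (i+1)) (fcsSuffix (l.drop (i+1)))
              (if bm > 0 then if bm < m then count + 1 else count
               else if l[i] < m then count + 1 else count)
              (if l[i+1] > bm then l[i+1] else bm) := by
        rw [hd1] at hsufcons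
        rw [hd1, hsufcons]
        rw [hd2] at hsuf ⊢
        simp only [fcsForward]
        rw [hsuf]
      rw [hA, hhead, ih (i + 1) _ _ hi1 (by omega)]
      exact hforward.symm

-- ===== VERDICT (by name: the statement is the Claim_ definition above) =====
theorem find_count_segments_spec : Claim_equal_find_count_segments := by
  intro array _ hpre
  unfold Spec_find_count_segments find_count_segments find_count_segments_alt
  have hlen : 0 < array.length := List.length_pos_iff.mpr hpre
  have := loop_eq array array.length 0 1 0 hlen (by omega)
  simpa using this
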